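-- pv_equiv track=rewrite | github.com/learnwithparam/monkey-kata | api/demos/legal_contract_analyzer/legal_agentic_rag.py | _parse_terms_response
-- ===== SOURCE A (Python) =====
-- from typing import Dict, List, Any, Optional, TypedDict
--
-- def _parse_terms_response(response: str) -> List[Dict[str, Any]]:
--     """Parse key terms response"""
--     terms = []
--     lines = response.split('\n')
--
--     current_term = {}
--     for line in lines:
--         line = line.strip()
--         if line.startswith('TERM:'):
--             if current_term:
--                 terms.append(current_term)
--             current_term = {'term': line.split(':', 1)[1].strip()}
--         elif line.startswith('DEFINITION:'):
--             current_term['definition'] = line.split(':', 1)[1].strip()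
--         elif line.startswith('IMPORTANCE:'):
--             current_term['importance'] = line.split(':', 1)[1].strip().lower()
--         elif line.startswith('CLAUSE:'):
--             current_term['clause'] = line.split(':', 1)[1].strip()
--
--     if current_term:
--         terms.append(current_term)
--
--     return terms
-- ===== SOURCE B (Python) =====
-- def _parse_terms_response(response):
--     """Parse key terms response: group lines at TERM: boundaries, then build a dict per group."""
--     groups = [[]]
--     for ln in response.split('\n'):
--         ln = ln.strip()
--         if ln.startswith('TERM:'):
--             groups.append([ln])
--         else:
--             groups[-1].append(ln)
--
--     keymap = [('TERM:', 'term'), ('DEFINITION:', 'definition'),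
--               ('IMPORTANCE:', 'importance'), ('CLAUSE:', 'clause')]
--
--     def build(group):
--         d = {}
--         for ln in group:
--             for prefix, key in keymap:
--                 if ln.startswith(prefix):
--                     value = ln.split(':', 1)[1].strip()
--                     d[key] = value.lower() if key == 'importance' else value
--                     break
--         return d
--
--     return [d for d in map(build, groups) if d]
-- ===== Notes on version B (the rewrite author's own statement) =====
-- stated objective: alternative
-- what changed: Replaces A's single stateful loop with flush logic by a two-pass decomposition: first partition stripped lines into groups at TERM: boundaries, then map each group to a dict with a table-driven prefix scan, keeping non-empty dicts.
import Mathlib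
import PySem

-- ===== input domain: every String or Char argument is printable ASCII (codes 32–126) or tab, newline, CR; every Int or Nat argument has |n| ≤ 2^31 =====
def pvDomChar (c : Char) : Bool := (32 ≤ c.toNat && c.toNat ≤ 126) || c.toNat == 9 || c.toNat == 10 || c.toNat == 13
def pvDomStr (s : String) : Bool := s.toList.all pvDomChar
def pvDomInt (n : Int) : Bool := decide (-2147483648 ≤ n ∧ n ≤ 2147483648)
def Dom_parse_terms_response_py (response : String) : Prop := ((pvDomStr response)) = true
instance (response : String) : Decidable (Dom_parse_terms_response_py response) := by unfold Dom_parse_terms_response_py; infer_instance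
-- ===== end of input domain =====

-- B re-implements the parser as two passes (partition stripped lines into groups at TERM:
-- boundaries, then a table-driven dict build per group) instead of A's single stateful loop
-- with flush logic; objective: alternative decomposition, same cost.

-- ===== PORT A =====
-- line.split(':', 1)[1].strip(); the "" default of pyGetD is unreachable: it is only applied to
-- lines that start with '<PREFIX>:', so the split always has a second part (exact there).
def pvValA (l : String) : String :=
  PySem.Str.strip (PySem.List.pyGetD ((PySem.Str.splitMax? l ":" 1).getD []) 1 "")

def pvStepA (st : List (List (String × String)) × PySem.Dict String String) (line : String) :
    List (List (String × String)) × PySem.Dict String String :=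
  let l := PySem.Str.strip line
  if PySem.Str.startswith l "TERM:" then
    ((if st.2.items = [] then st.1 else st.1 ++ [st.2.items]),
     PySem.Dict.ofList [("term", pvValA l)])
  else if PySem.Str.startswith l "DEFINITION:" then
    (st.1, st.2.insert "definition" (pvValA l))
  else if PySem.Str.startswith l "IMPORTANCE:" then
    (st.1, st.2.insert "importance" (PySem.Str.lower (pvValA l)))
  else if PySem.Str.startswith l "CLAUSE:" then
    (st.1, st.2.insert "clause" (pvValA l))
  else st

def parse_terms_response_py (response : String) : List (List (String × String)) :=
  let lines := (PySem.Str.split? response "\n").getD []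
  let st := lines.foldl pvStepA ([], PySem.Dict.empty)
  if st.2.items = [] then st.1 else st.1 ++ [st.2.items]

-- ===== PORT B =====
-- same unreachable-default remark as pvValA
def pvValB (l : String) : String :=
  PySem.Str.strip (PySem.List.pyGetD ((PySem.Str.splitMax? l ":" 1).getD []) 1 "")

def pvKeymapB : List (String × String) :=
  [("TERM:", "term"), ("DEFINITION:", "definition"), ("IMPORTANCE:", "importance"), ("CLAUSE:", "clause")]

-- inner 'for prefix, key in keymap: … break' loop of build
def pvApplyB (d : PySem.Dict String String) (ln : String) :
    List (String × String) → PySem.Dict String String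
  | [] => d
  | (pre, key) :: rest =>
      if PySem.Str.startswith ln pre then
        let v := pvValB ln
        d.insert key (if key == "importance" then PySem.Str.lower v else v)
      else pvApplyB d ln rest

def pvBuildB (g : List String) : PySem.Dict String String :=
  g.foldl (fun d ln => pvApplyB d ln pvKeymapB) PySem.Dict.empty

-- the grouping pass: state = (closed groups, current group = groups[-1])
def pvGroupStepB (st : List (List String) × List String) (line : String) :
    List (List String) × List String :=
  let ln := PySem.Str.strip line
  if PySem.Str.startswith ln "TERM:" then (st.1 ++ [st.2], [ln]) else (st.1, st.2 ++ [ln])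

def parse_terms_response_py_alt (response : String) : List (List (String × String)) :=
  let st := ((PySem.Str.split? response "\n").getD []).foldl pvGroupStepB ([], [])
  let groups := st.1 ++ [st.2]
  (groups.map (fun g => (pvBuildB g).items)).filter (fun d => d ≠ [])

-- ===== PRECONDITION & SPEC =====
def Spec_parse_terms_response_py (response : String) (out : List (List (String × String))) : Prop := out = parse_terms_response_py_alt response
instance (response : String) (out : List (List (String × String))) : Decidable (Spec_parse_terms_response_py response out) := by unfold Spec_parse_terms_response_py; infer_instance

-- ===== CLAIM =====
def Claim_equal_parse_terms_response_py : Prop := ∀ (response : String), Dom_parse_terms_response_py response → Spec_parse_terms_response_py response (parse_terms_response_py response)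

-- ===== LEMMAS AND PROOFS =====

-- A's loop from an arbitrary current dict, terms accumulator empty, plus the final flush
def pvRunA (cur : PySem.Dict String String) (ls : List String) : List (List (String × String)) :=
  let st := ls.foldl pvStepA ([], cur)
  if st.2.items = [] then st.1 else st.1 ++ [st.2.items]

-- B's output from an arbitrary grouping state (c = closed groups, g = current group)
def pvRunOut (c : List (List String)) (g : List String) (ls : List String) :
    List (List (String × String)) :=
  let st := ls.foldl pvGroupStepB (c, g)
  ((st.1 ++ [st.2]).map (fun x => (pvBuildB x).items)).filter (fun d => d ≠ [])

theorem pvStepA_acc (ls : List String) (t : List (List (String × String)))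
    (c : PySem.Dict String String) :
    ls.foldl pvStepA (t, c) =
      (t ++ (ls.foldl pvStepA ([], c)).1, (ls.foldl pvStepA ([], c)).2) := by
  induction ls generalizing t c with
  | nil => simp
  | cons l ls ih =>
      simp only [List.foldl_cons]
      rw [ih, ih (pvStepA ([], c) l).1]
      simp only [pvStepA]
      split_ifs <;> simp

-- A's step on a non-TERM line is B's table scan on the stripped line
set_option maxHeartbeats 1000000 in
theorem pvStepA_eq_apply (t : List (List (String × String))) (c : PySem.Dict String String)
    (l : String) (h : PySem.Str.startswith (PySem.Str.strip l) "TERM:" = false) :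
    pvStepA (t, c) l = (t, pvApplyB c (PySem.Str.strip l) pvKeymapB) := by
  simp only [pvStepA, pvApplyB, pvKeymapB, h, Bool.false_eq_true, if_false, pvValA, pvValB]
  split_ifs <;> simp_all

theorem pvBuildB_append (g : List String) (l : String) :
    pvBuildB (g ++ [l]) = pvApplyB (pvBuildB g) l pvKeymapB := by
  simp [pvBuildB, List.foldl_append]

set_option maxHeartbeats 1000000 in
theorem pvRunOut_eq_pvRunA (ls : List String) (c : List (List String)) (g : List String) :
    pvRunOut c g ls =
      ((c.map (fun x => (pvBuildB x).items)).filter (fun d => d ≠ [])) ++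
        pvRunA (pvBuildB g) ls := by
  induction ls generalizing c g with
  | nil =>
      simp only [pvRunOut, pvRunA, List.foldl_nil, List.map_append, List.map_cons, List.map_nil,
        List.filter_append, List.filter_cons, List.filter_nil]
      by_cases hg : (pvBuildB g).items = [] <;> simp [hg]
  | cons l ls ih =>
      by_cases h : PySem.Str.startswith (PySem.Str.strip l) "TERM:" = true
      · -- TERM line: B closes the current group; A flushes and reseeds
        have hseed : pvBuildB [PySem.Str.strip l] =
            PySem.Dict.ofList [("term", pvValA (PySem.Str.strip l))] := by
          simp only [pvBuildB, List.foldl_cons, List.foldl_nil, pvApplyB, pvKeymapB, h, if_true]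
          rfl
        have hB : pvRunOut c g (l :: ls) = pvRunOut (c ++ [g]) [PySem.Str.strip l] ls := by
          simp only [pvRunOut, List.foldl_cons, pvGroupStepB, h, if_true]
        have hA : pvRunA (pvBuildB g) (l :: ls) =
            (if (pvBuildB g).items = [] then [] else [(pvBuildB g).items]) ++
              pvRunA (PySem.Dict.ofList [("term", pvValA (PySem.Str.strip l))]) ls := by
          simp only [pvRunA, List.foldl_cons, pvStepA, h, if_true]
          rw [pvStepA_acc]
          by_cases hc : (pvBuildB g).items = []
          · simp [hc]
          · simp [hc]
            split <;> rfl
        rw [hB, ih, hA, hseed]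
        simp only [List.map_append, List.map_cons, List.map_nil, List.filter_append,
          List.filter_cons, List.filter_nil]
        by_cases hc : (pvBuildB g).items = []
        · simp [hc]
        · simp only [hc, decide_not, decide_false, Bool.not_false, if_true]
          split <;> simp_all [List.append_assoc]
      · -- non-TERM line: B extends the current group; A updates the current dict
        rw [Bool.not_eq_true] at h
        have hB : pvRunOut c g (l :: ls) = pvRunOut c (g ++ [PySem.Str.strip l]) ls := by
          simp only [pvRunOut, List.foldl_cons, pvGroupStepB, h, Bool.false_eq_true, if_false]
        have hA : pvRunA (pvBuildB g) (l :: ls) =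
            pvRunA (pvApplyB (pvBuildB g) (PySem.Str.strip l) pvKeymapB) ls := by
          simp only [pvRunA, List.foldl_cons, pvStepA_eq_apply _ _ _ h]
        rw [hB, ih, hA, pvBuildB_append]

-- ===== VERDICT =====
theorem parse_terms_response_py_spec : Claim_equal_parse_terms_response_py := by
  intro response _
  show parse_terms_response_py response = parse_terms_response_py_alt response
  have := pvRunOut_eq_pvRunA ((PySem.Str.split? response "\n").getD []) [] []
  simpa [pvRunOut, pvRunA, parse_terms_response_py, parse_terms_response_py_alt, pvBuildB]
    using this.symm
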